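-- pv_equiv track=rewrite | github.com/jergusgolian/advent-of-code | 3/3 - Part Two.py | solve_joltage_puzzle
-- ===== SOURCE A (Python) =====
-- def solve_joltage_puzzle(battery_banks, num_batteries):
--     """
--     Calculates the total maximum joltage by finding the largest number
--     formed by selecting `num_batteries` digits from each bank.
--
--     Args:
--         battery_banks (list of str): A list where each string is a battery bank.
--         num_batteries (int): The exact number of batteries to turn on in each bank.
--
--     Returns:
--         int: The sum of the maximum joltage (number) from all banks.
--     """
--     total_joltage = 0
--
--     for bank in battery_banks:
--         bank = bank.strip()
--         n = len(bank)
--         k = num_batteries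
--         num_deletions = n - k
--
--         digits = list(bank)
--
--         stack = []
--
--         for digit in digits:
--             while stack and num_deletions > 0 and digit > stack[-1]:
--                 stack.pop()
--                 num_deletions -= 1
--             stack.append(digit)
--
--         while num_deletions > 0:
--             stack.pop()
--             num_deletions -= 1
--
--         max_joltage_str = "".join(stack)
--         total_joltage += int(max_joltage_str)
--
--     return total_joltage
-- ===== SOURCE B (Python) =====
-- def _pick(digits, k):
--     """Lexicographically largest length-k subsequence, built left to right:
--     each step takes the leftmost maximum of the window that still leaves
--     enough characters for the remaining picks."""
--     if k <= 0:
--         return ""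
--     window = digits[:len(digits) - k + 1]
--     m = max(window)
--     j = window.index(m)
--     return m + _pick(digits[j + 1:], k - 1)
--
-- def solve_joltage_puzzle(battery_banks, num_batteries):
--     total = 0
--     for bank in battery_banks:
--         digits = bank.strip()
--         if num_batteries >= len(digits):
--             chosen = digits
--         else:
--             chosen = _pick(digits, num_batteries)
--         total += int(chosen)
--     return total
-- ===== Notes on version B (the rewrite author's own statement) =====
-- stated objective: alternative
-- what changed: A deletes n-k digits with a monotonic stack (pop smaller tops while a deletion budget lasts); B builds the kept k digits directly by recursive windowed selection: pick the leftmost maximum of bank[:n-k+1] and recurse on the remainder.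
-- outside the precondition, e.g. on solve_joltage_puzzle(['+5'], 2): A returns 5, B returns 5; on solve_joltage_puzzle(['1_000'], 9): A returns 1000, B returns 1000
import Mathlib
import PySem

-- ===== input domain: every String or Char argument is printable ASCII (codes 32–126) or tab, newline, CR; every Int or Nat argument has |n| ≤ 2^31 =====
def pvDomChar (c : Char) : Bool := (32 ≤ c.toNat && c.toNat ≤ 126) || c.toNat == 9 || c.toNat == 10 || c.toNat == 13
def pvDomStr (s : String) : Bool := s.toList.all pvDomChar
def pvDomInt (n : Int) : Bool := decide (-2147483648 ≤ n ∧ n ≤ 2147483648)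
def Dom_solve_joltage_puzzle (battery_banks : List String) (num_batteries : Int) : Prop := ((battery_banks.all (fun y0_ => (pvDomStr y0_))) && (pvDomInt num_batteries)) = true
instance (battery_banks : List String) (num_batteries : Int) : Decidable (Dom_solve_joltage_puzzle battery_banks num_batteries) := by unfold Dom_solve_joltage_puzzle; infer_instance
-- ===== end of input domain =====

-- B replaces A's monotonic-stack digit deletion by a windowed max-selection that picks the
-- k kept digits directly (objective: alternative — a genuinely different greedy, similar cost).

-- ===== PORT A =====
-- A's stack is kept reversed: the head of the list is Python's stack[-1] (the top).
-- 'while stack and num_deletions > 0 and digit > stack[-1]: stack.pop(); num_deletions -= 1'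
def pvPopWhile (stack : List Char) (d : Int) (c : Char) : List Char × Int :=
  match stack with
  | [] => ([], d)
  | t :: rest => if 0 < d ∧ t < c then pvPopWhile rest (d - 1) c else (t :: rest, d)

-- one iteration of 'for digit in digits': the while-loop, then stack.append(digit)
def pvStep (st : List Char × Int) (c : Char) : List Char × Int :=
  (c :: (pvPopWhile st.1 st.2 c).1, (pvPopWhile st.1 st.2 c).2)

-- 'while num_deletions > 0: stack.pop(); num_deletions -= 1'
-- (on an empty stack Python raises IndexError; that happens only outside Pre_, we return [])
def pvDropTop : List Char → Int → List Char
  | [], _ => []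
  | x :: rest, d => if 0 < d then pvDropTop rest (d - 1) else x :: rest

-- one iteration of 'for bank in battery_banks'
def pvBankA (num_batteries : Int) (bank : String) : Int :=
  let digits := (PySem.Str.strip bank).toList
  let st := digits.foldl pvStep ([], (digits.length : Int) - num_batteries)
  let kept := pvDropTop st.1 st.2
  (PySem.Int.ofChars? kept.reverse).getD 0  -- int("".join(stack)); Pre_ makes the parse succeed

def solve_joltage_puzzle (battery_banks : List String) (num_batteries : Int) : Int :=
  battery_banks.foldl (fun total bank => total + pvBankA num_batteries bank) 0

-- ===== PORT B =====
-- Source B _pick: leftmost maximum of the window that leaves room for the remaining picks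
def pvPick (digits : List Char) (k : Int) : List Char :=
  if _h : k ≤ 0 then []  -- Source B: 'if k <= 0: return ""'
  else
    let window := PySem.List.slice digits none (some ((digits.length : Int) - k + 1))
    match PySem.List.max? window (fun y => y) with
    | none => []  -- Source B: max([]) raises ValueError; unreachable from pvBankB (there k < len digits)
    | some m =>
      let j : Nat := (PySem.List.index? window m).getD 0
      m :: pvPick (PySem.List.slice digits (some ((j : Int) + 1)) none) (k - 1)
termination_by k.toNat
decreasing_by omega

def pvBankB (num_batteries : Int) (bank : String) : Int :=
  let digits := (PySem.Str.strip bank).toList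
  let chosen := if (digits.length : Int) ≤ num_batteries then digits
                else pvPick digits num_batteries
  (PySem.Int.ofChars? chosen).getD 0  -- int(chosen); Pre_ makes the parse succeed

def solve_joltage_puzzle_alt (battery_banks : List String) (num_batteries : Int) : Int :=
  battery_banks.foldl (fun total bank => total + pvBankB num_batteries bank) 0

-- ===== PRECONDITION & SPEC =====
-- Pre_ restricts to the puzzle's natural domain — positive num_batteries and banks that are
-- non-empty digit strings after strip. Outside it A almost always raises (int('') / int on
-- non-digits → ValueError, over-popping → IndexError); on the few int()-parsable oddities it
-- still returns on (a '+5' or '1_000' bank taken whole, or an empty bank list with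
-- num_batteries ≤ 0) B returns the same value anyway.
def Pre_solve_joltage_puzzle (battery_banks : List String) (num_batteries : Int) : Prop :=
  ∀ bank ∈ battery_banks, 1 ≤ num_batteries ∧
    (PySem.Str.strip bank).toList ≠ [] ∧
    ((PySem.Str.strip bank).toList.all PySem.Chars.isdigit) = true
instance (battery_banks : List String) (num_batteries : Int) : Decidable (Pre_solve_joltage_puzzle battery_banks num_batteries) := by unfold Pre_solve_joltage_puzzle; infer_instance

def pvWitness_solve_joltage_puzzle : List String × Int := (["934", " 2717 "], 2)

def Spec_solve_joltage_puzzle (battery_banks : List String) (num_batteries : Int) (out : Int) : Prop := out = solve_joltage_puzzle_alt battery_banks num_batteries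
instance (battery_banks : List String) (num_batteries : Int) (out : Int) : Decidable (Spec_solve_joltage_puzzle battery_banks num_batteries out) := by unfold Spec_solve_joltage_puzzle; infer_instance

-- ===== CLAIM (what is proved, stated in full; the proofs are below) =====
def Claim_equal_solve_joltage_puzzle : Prop := ∀ (battery_banks : List String) (num_batteries : Int), Dom_solve_joltage_puzzle battery_banks num_batteries → Pre_solve_joltage_puzzle battery_banks num_batteries → Spec_solve_joltage_puzzle battery_banks num_batteries (solve_joltage_puzzle battery_banks num_batteries)

-- ===== LEMMAS AND PROOFS =====

-- A's result on one bank, as a function of the deletion budget d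
def pvKeptA (cs : List Char) (d : Int) : List Char :=
  (pvDropTop (cs.foldl pvStep ([], d)).1 (cs.foldl pvStep ([], d)).2).reverse

-- ---- pvPopWhile facts ----
theorem pw_nonpos (st : List Char) (d : Int) (c : Char) (hd : d ≤ 0) :
    pvPopWhile st d c = (st, d) := by
  cases st with
  | nil => rfl
  | cons t rest => simp [pvPopWhile]; omega

theorem pw_bundle (st : List Char) (d : Int) (c : Char) :
    (pvPopWhile st d c).1 <:+ st ∧
    ((pvPopWhile st d c).1.length : Int) - (pvPopWhile st d c).2 = (st.length : Int) - d ∧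
    (0 ≤ d → 0 ≤ (pvPopWhile st d c).2) := by
  induction st generalizing d with
  | nil => simp [pvPopWhile]
  | cons t rest ih =>
    by_cases h : 0 < d ∧ t < c
    · have := ih (d - 1)
      simp only [pvPopWhile, if_pos h]
      refine ⟨(this.1).trans (List.suffix_cons t rest), by have := this.2.1; simp only [List.length_cons] at this ⊢; omega,
        fun _ => this.2.2 (by omega)⟩
    · simp [pvPopWhile, if_neg h]

theorem pw_drain_all (st : List Char) (d : Int) (c : Char)
    (hlt : ∀ x ∈ st, x < c) (hd : (st.length : Int) ≤ d) :
    pvPopWhile st d c = ([], d - st.length) := by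
  induction st generalizing d with
  | nil => simp [pvPopWhile]
  | cons t rest ih =>
    have h : 0 < d ∧ t < c := ⟨by simp at hd; omega, hlt t (by simp)⟩
    rw [pvPopWhile, if_pos h, ih (d - 1) (fun x hx => hlt x (by simp [hx])) (by simp at hd ⊢; omega)]
    simp; ring

-- c ≤ m: the pop loop never reaches the sentinel m — lockstep with the bare stack
theorem pw_append (above rest : List Char) (d : Int) (m c : Char) (hc : ¬ m < c) :
    pvPopWhile (above ++ m :: rest) d c =
      ((pvPopWhile above d c).1 ++ m :: rest, (pvPopWhile above d c).2) := by
  induction above generalizing d with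
  | nil => simp [pvPopWhile, hc]
  | cons a ab ih =>
    by_cases h : 0 < d ∧ a < c
    · simpa [pvPopWhile, if_pos h] using ih (d - 1)
    · simp [pvPopWhile, if_neg h]

-- m < c but the budget runs out inside `above`: both stacks pop exactly d elements
theorem pw_drain_budget (above rest : List Char) (d : Int) (m c : Char)
    (h0 : 0 ≤ d) (hd : d ≤ (above.length : Int)) (habove : ∀ a ∈ above, a ≤ m) (hm : m < c) :
    pvPopWhile (above ++ m :: rest) d c = (above.drop d.toNat ++ m :: rest, 0) ∧
    pvPopWhile above d c = (above.drop d.toNat, 0) := by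
  induction above generalizing d with
  | nil =>
    have : d = 0 := by simp at hd; omega
    subst this
    simp [pw_nonpos]
  | cons a ab ih =>
    by_cases hz : d = 0
    · subst hz
      simp [pw_nonpos]
    · have hcond : 0 < d ∧ a < c := ⟨by omega, lt_of_le_of_lt (habove a (by simp)) hm⟩
      have ih' := ih (d - 1) (by omega) (by simp at hd ⊢; omega)
        (fun x hx => habove x (by simp [hx]))
      have hdt : d.toNat = (d - 1).toNat + 1 := by omega
      constructor
      · rw [List.cons_append, pvPopWhile, if_pos hcond, ih'.1, hdt, List.drop_succ_cons]
      · rw [pvPopWhile, if_pos hcond, ih'.2, hdt, List.drop_succ_cons]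

-- ---- fold length/membership invariant ----
theorem fold_invariant (xs : List Char) (st₀ : List Char) (d₀ : Int) :
    ((xs.foldl pvStep (st₀, d₀)).1.length : Int) - (xs.foldl pvStep (st₀, d₀)).2
      = (st₀.length : Int) - d₀ + xs.length ∧
    (∀ x ∈ (xs.foldl pvStep (st₀, d₀)).1, x ∈ st₀ ∨ x ∈ xs) ∧
    (0 ≤ d₀ → 0 ≤ (xs.foldl pvStep (st₀, d₀)).2) := by
  induction xs generalizing st₀ d₀ with
  | nil => simp
  | cons c xs ih =>
    have hpw := pw_bundle st₀ d₀ c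
    have ih' := ih (c :: (pvPopWhile st₀ d₀ c).1) (pvPopWhile st₀ d₀ c).2
    simp only [List.foldl_cons, pvStep] at ih' ⊢
    refine ⟨by have h1 := ih'.1; have h2 := hpw.2.1; simp only [List.length_cons] at h1 h2 ⊢; push_cast at h1 h2 ⊢; omega, ?_, ?_⟩
    · intro x hx
      rcases ih'.2.1 x hx with hc | hc
      · rcases List.mem_cons.mp hc with hc | hc
        · simp [hc]
        · exact Or.inl (hpw.1.subset hc)
      · simp [hc]
    · intro h0; exact ih'.2.2 (hpw.2.2 h0)

theorem fold_nonpos (xs : List Char) (acc : List Char) (d : Int) (hd : d ≤ 0) :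
    xs.foldl pvStep (acc, d) = (xs.reverse ++ acc, d) := by
  induction xs generalizing acc with
  | nil => simp
  | cons c xs ih =>
    simp only [List.foldl_cons, pvStep, pw_nonpos _ _ _ hd]
    rw [ih (c :: acc)]
    simp

-- ---- pvDropTop facts ----
theorem dropTop_nonpos (st : List Char) (d : Int) (hd : d ≤ 0) : pvDropTop st d = st := by
  cases st with
  | nil => rfl
  | cons x rest => simp [pvDropTop]; omega

theorem dropTop_all (st : List Char) (d : Int) (hd : (st.length : Int) ≤ d) :
    pvDropTop st d = [] := by
  induction st generalizing d with
  | nil => rfl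
  | cons x rest ih =>
    have : 0 < d := by simp at hd; omega
    rw [pvDropTop, if_pos this]
    exact ih (d - 1) (by simp at hd ⊢; omega)

theorem dropTop_append (st rest : List Char) (d : Int) (hd : d ≤ (st.length : Int)) :
    pvDropTop (st ++ rest) d = pvDropTop st d ++ rest := by
  induction st generalizing d with
  | nil =>
    simp at hd
    simp [dropTop_nonpos _ _ hd, pvDropTop]
  | cons x st ih =>
    by_cases h : 0 < d
    · simp only [List.cons_append, pvDropTop, if_pos h]
      exact ih (d - 1) (by simp at hd ⊢; omega)
    · simp [pvDropTop, if_neg h]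

-- ---- the suffix lockstep lemma: a sentinel m below the stack is never popped ----
def pvCnt (ys : List Char) (m : Char) : Nat := (ys.takeWhile (fun x => decide (x ≤ m))).length

theorem fold_lockstep (ys : List Char) (above rest : List Char) (d : Int) (m : Char)
    (hInv : d ≤ 0 ∨ ((∀ a ∈ above, a ≤ m) ∧ d ≤ (above.length : Int) + (pvCnt ys m : Int))) :
    ys.foldl pvStep (above ++ m :: rest, d) =
      ((ys.foldl pvStep (above, d)).1 ++ m :: rest, (ys.foldl pvStep (above, d)).2) ∧
    ((ys.foldl pvStep (above, d)).2 ≤ 0 ∨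
      (ys.foldl pvStep (above, d)).2 ≤ ((ys.foldl pvStep (above, d)).1.length : Int)) := by
  induction ys generalizing above d with
  | nil =>
    refine ⟨rfl, ?_⟩
    simp only [List.foldl_nil]
    rcases hInv with h | ⟨_, h⟩
    · exact Or.inl h
    · exact Or.inr (by simp [pvCnt] at h; omega)
  | cons c ys ih =>
    simp only [List.foldl_cons, pvStep]
    by_cases hd : d ≤ 0
    · rw [pw_nonpos _ _ _ hd, pw_nonpos above d c hd]
      rw [show (c :: (above, d).1, (above, d).2) = ((c :: above), d) from rfl]
      rw [show ((c :: ((above ++ m :: rest, d).1), ((above ++ m :: rest, d)).2) : List Char × Int)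
            = ((c :: above) ++ m :: rest, d) from rfl]
      exact ih (c :: above) d (Or.inl hd)
    · have hd' : 0 < d := by omega
      rcases hInv with h | ⟨h1, h2⟩
      · omega
      by_cases hc : m < c
      · -- the arriving digit is bigger than the sentinel: the budget drains to 0 first
        have hcm : ¬ c ≤ m := not_le.mpr hc
        have hcnt : pvCnt (c :: ys) m = 0 := by simp [pvCnt, hcm]
        have hlen : d ≤ (above.length : Int) := by rw [hcnt] at h2; omega
        obtain ⟨e1, e2⟩ := pw_drain_budget above rest d m c (le_of_lt hd') hlen h1 hc
        rw [e1, e2]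
        rw [show ((c :: ((above.drop d.toNat ++ m :: rest, (0:Int)).1),
              ((above.drop d.toNat ++ m :: rest, (0:Int))).2) : List Char × Int)
            = ((c :: above.drop d.toNat) ++ m :: rest, 0) from rfl]
        exact ih (c :: above.drop d.toNat) 0 (Or.inl le_rfl)
      · -- the arriving digit is at most the sentinel: the pop loop never reaches it
        rw [pw_append above rest d m c hc]
        rw [show ((c :: (((pvPopWhile above d c).1 ++ m :: rest, (pvPopWhile above d c).2)).1,
              (((pvPopWhile above d c).1 ++ m :: rest, (pvPopWhile above d c).2)).2) : List Char × Int)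
            = ((c :: (pvPopWhile above d c).1) ++ m :: rest, (pvPopWhile above d c).2) from rfl]
        apply ih (c :: (pvPopWhile above d c).1) (pvPopWhile above d c).2
        right
        have hpw := pw_bundle above d c
        refine ⟨?_, ?_⟩
        · intro a ha
          rcases List.mem_cons.mp ha with ha | ha
          · exact ha ▸ not_lt.mp hc
          · exact h1 a (hpw.1.subset ha)
        · have hcnt : pvCnt (c :: ys) m = pvCnt ys m + 1 := by
            simp [pvCnt, not_lt.mp hc]
          rw [hcnt] at h2
          have := hpw.2.1
          simp only [List.length_cons] at *
          omega

-- ---- prefix lemma: the leftmost window maximum swallows everything before it ----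
theorem fold_prefix (u : List Char) (m : Char) (D : Int)
    (hlt : ∀ x ∈ u, x < m) (hD : (u.length : Int) ≤ D) :
    (u ++ [m]).foldl pvStep ([], D) = ([m], D - u.length) := by
  rw [List.foldl_append]
  obtain ⟨st, d₀, hfold⟩ : ∃ st d₀, u.foldl pvStep ([], D) = (st, d₀) := ⟨_, _, rfl⟩
  have hinv := fold_invariant u [] D
  rw [hfold] at hinv
  simp only [hfold, List.foldl_cons, List.foldl_nil, pvStep]
  have hmem : ∀ x ∈ st, x < m := by
    intro x hx
    rcases hinv.2.1 x hx with h | h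
    · simp at h
    · exact hlt x h
  have hlen : (st.length : Int) ≤ d₀ := by simp at hinv; omega
  rw [pw_drain_all st d₀ m hmem hlen]
  simp at hinv ⊢
  omega

-- a prefix of elements satisfying the predicate bounds takeWhile's length from below
theorem takeWhile_length_ge (p : Char → Bool) (ys : List Char) (t : Nat) (ht : t ≤ ys.length)
    (h : ∀ i (hi : i < t), p (ys[i]'(by omega)) = true) :
    t ≤ (ys.takeWhile p).length := by
  induction ys generalizing t with
  | nil => simp at ht; omega
  | cons y ys ih =>
    cases t with
    | zero => omega
    | succ t =>
      have hy := h 0 (by omega)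
      simp at hy
      simp only [List.takeWhile_cons, hy, if_true, List.length_cons, Nat.succ_le_succ_iff]
      exact ih t (by simpa using ht) (fun i hi => by simpa using h (i + 1) (by omega))

-- ---- closed forms of A's per-bank result in the degenerate budget ranges ----
theorem keptA_nonpos (cs : List Char) (d : Int) (hd : d ≤ 0) : pvKeptA cs d = cs := by
  unfold pvKeptA
  rw [fold_nonpos cs [] d hd, dropTop_nonpos _ _ hd]
  simp

theorem keptA_drain (cs : List Char) (d : Int) (hd : (cs.length : Int) ≤ d) :
    pvKeptA cs d = [] := by
  unfold pvKeptA
  have hinv := fold_invariant cs [] d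
  rw [dropTop_all _ _ (by have := hinv.1; simp at this; omega)]
  rfl

-- ---- the main per-bank theorem: stack-deletion = windowed selection ----
theorem keptA_eq_pick (k : Nat) : ∀ (cs : List Char), k ≤ cs.length →
    pvKeptA cs ((cs.length : Int) - k) = pvPick cs k := by
  induction k with
  | zero =>
    intro cs _
    rw [keptA_drain cs _ (by simp), pvPick]
    simp
  | succ k ih =>
    intro cs hk
    have hne : cs ≠ [] := by intro h; subst h; simp at hk
    set n := cs.length with hn
    set D : Nat := n - (k + 1) with hD
    have hDn : D + 1 ≤ n := by omega
    set w : List Char := cs.take (D + 1) with hw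
    have hwlen : w.length = D + 1 := by simp [hw]; omega
    have hwget : ∀ (i : Nat) (hi : i < D + 1), w[i]'(by omega) = cs[i]'(by omega) := by
      intro i hi; simp [hw]
    -- the window maximum m and its leftmost position j
    obtain ⟨m, hm⟩ : ∃ m, PySem.List.max? w (fun y => y) = some m := by
      cases h : PySem.List.max? w (fun y => y) with
      | none =>
        exact absurd ((PySem.List.max?_eq_none_iff _ _).mp h) (by intro h'; rw [h'] at hwlen; simp at hwlen)
      | some m => exact ⟨m, rfl⟩
    have hmax : ∀ y ∈ w, y ≤ m := PySem.List.max?_isMax hm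
    obtain ⟨j, hj⟩ : ∃ j, PySem.List.index? w m = some j :=
      Option.isSome_iff_exists.mp ((PySem.List.index?_isSome_iff _ _).mpr (PySem.List.max?_mem hm))
    obtain ⟨hjlt, hjget, hjfirst⟩ := PySem.List.getElem_of_index?_eq_some hj
    have hjD : j ≤ D := by omega
    have hjn : j < n := by omega
    -- B unfolds to m :: pick (cs.drop (j+1)) k
    have hB : pvPick cs (k + 1 : Nat) = m :: pvPick (cs.drop (j + 1)) k := by
      rw [pvPick]
      rw [dif_neg (by push_cast; omega)]
      have hcast : ((cs.length : Int) - (k + 1 : Nat) + 1) = ((D + 1 : Nat) : Int) := by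
        push_cast; omega
      have hcast2 : ((j : Int) + 1) = ((j + 1 : Nat) : Int) := by push_cast; ring_nf
      have hcast3 : ((k + 1 : Nat) : Int) - 1 = (k : Int) := by push_cast; ring
      simp only [hcast, PySem.List.slice_to_natCast, ← hw, hm, hj, Option.getD_some,
        hcast2, PySem.List.slice_from_natCast, hcast3]
    -- A: split cs at position j; everything before the leftmost window max is swallowed
    have hsplit : cs = cs.take (j + 1) ++ cs.drop (j + 1) := (List.take_append_drop _ _).symm
    set u : List Char := cs.take j with hu
    have hulen : u.length = j := by simp [hu]; omega
    have htake : cs.take (j + 1) = u ++ [m] := by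
      rw [List.take_add_one, hu]
      have : cs[j]? = some m := by
        rw [List.getElem?_eq_getElem hjn]
        have := hwget j (by omega)
        rw [hjget] at this
        exact congrArg some this.symm
      simp [this]
    have hult : ∀ x ∈ u, x < m := by
      intro x hx
      obtain ⟨i, hi, hxi⟩ := List.mem_iff_getElem.mp hx
      rw [hulen] at hi
      have hgu : u[i]'(by omega) = w[i]'(by omega) := by
        simp [hu, hw, List.getElem_take]
      have hne' : w[i]'(by omega) ≠ m := hjfirst i hi
      have hle : w[i]'(by omega) ≤ m := hmax _ (List.getElem_mem _)
      rw [← hxi, hgu]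
      exact lt_of_le_of_ne hle hne'
    set ys : List Char := cs.drop (j + 1) with hys
    have hyslen : ys.length = n - (j + 1) := by rw [hys, List.length_drop, ← hn]
    -- run the fold over the prefix, then over the suffix with sentinel m at the bottom
    have hDcast : ((cs.length : Int) - ((k + 1 : Nat) : Int)) = ((D : Nat) : Int) := by
      push_cast; omega
    have hfold1 : cs.foldl pvStep ([], ((D : Nat) : Int)) =
        ys.foldl pvStep ([m], (D : Int) - (j : Int)) := by
      conv_lhs => rw [hsplit]
      rw [List.foldl_append, htake, fold_prefix u m _ hult (by rw [hulen]; omega), hulen]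
    have hcnt : ((D : Int) - (j : Int)) ≤ 0 + ((pvCnt ys m : Nat) : Int) := by
      have : (D - j : Nat) ≤ pvCnt ys m := by
        apply takeWhile_length_ge _ _ _ (by omega)
        intro i hi
        have hidx : j + 1 + i < D + 1 := by omega
        have : ys[i]'(by omega) = cs[j + 1 + i]'(by omega) := by simp [hys]
        rw [this]
        have hcw : cs[j + 1 + i]'(by omega) = w[j + 1 + i]'(by omega) := (hwget _ hidx).symm
        rw [hcw]
        simp [hmax _ (List.getElem_mem _)]
      omega
    have hlock := fold_lockstep ys [] [] ((D : Int) - (j : Int)) m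
      (Or.inr ⟨by simp, by simpa using hcnt⟩)
    set r := ys.foldl pvStep ([], (D : Int) - (j : Int)) with hr
    have hr2 : 0 ≤ r.2 := (fold_invariant ys [] _).2.2 (by omega)
    have hr2len : r.2 ≤ (r.1.length : Int) := by
      rcases hlock.2 with h | h
      · omega
      · exact h
    have hA : pvKeptA cs ((D : Nat) : Int) = m :: pvKeptA ys ((D : Int) - (j : Int)) := by
      unfold pvKeptA
      rw [hfold1]
      have h1 : ys.foldl pvStep ([m], (D : Int) - (j : Int)) = (r.1 ++ [m], r.2) := by
        have := hlock.1
        simpa using this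
      rw [h1]
      rw [dropTop_append r.1 [m] r.2 hr2len, List.reverse_append, ← hr]
      rfl
    rw [hDcast, hA, hB]
    have hyk : ((ys.length : Int) - (k : Int)) = ((D : Int) - (j : Int)) := by
      rw [hyslen]; omega
    rw [show pvKeptA ys ((D : Int) - (j : Int)) = pvKeptA ys (((ys.length : Int)) - (k : Int)) by rw [hyk]]
    rw [ih ys (by omega)]

-- the two per-bank computations, written over pvKeptA / the chosen list
theorem bankA_as_keptA (k : Int) (bank : String) :
    pvBankA k bank = (PySem.Int.ofChars? (pvKeptA ((PySem.Str.strip bank).toList)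
      (((((PySem.Str.strip bank).toList).length : Nat) : Int) - k))).getD 0 := rfl

theorem bank_eq (bank : String) (k : Int) : pvBankA k bank = pvBankB k bank := by
  rw [bankA_as_keptA]
  show _ = (PySem.Int.ofChars? (if (((PySem.Str.strip bank).toList.length : Nat) : Int) ≤ k
      then (PySem.Str.strip bank).toList
      else pvPick ((PySem.Str.strip bank).toList) k)).getD 0
  set cs := (PySem.Str.strip bank).toList with hcs
  have hl : pvKeptA cs (((cs.length : Nat) : Int) - k) =
      (if (((cs.length : Nat) : Int)) ≤ k then cs else pvPick cs k) := by
    by_cases hbig : ((cs.length : Nat) : Int) ≤ k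
    · rw [if_pos hbig, keptA_nonpos _ _ (by omega)]
    · rw [if_neg hbig]
      by_cases hk : 0 ≤ k
      · have hkn : k = ((k.toNat : Nat) : Int) := by omega
        rw [hkn]
        exact keptA_eq_pick k.toNat cs (by omega)
      · rw [pvPick, dif_pos (by omega), keptA_drain _ _ (by omega)]
  rw [hl]

-- ===== VERDICT (by name: the statement is the Claim_ definition above) =====
theorem foldl_bank_congr (k : Int) (bs : List String) : ∀ acc : Int,
    bs.foldl (fun t b => t + pvBankA k b) acc = bs.foldl (fun t b => t + pvBankB k b) acc := by
  induction bs with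
  | nil => intro acc; show acc = acc; rfl
  | cons b bs ih => intro acc; rw [List.foldl_cons, List.foldl_cons, bank_eq, ih]

theorem solve_joltage_puzzle_spec : Claim_equal_solve_joltage_puzzle := by
  intro banks k _ _
  unfold Spec_solve_joltage_puzzle solve_joltage_puzzle solve_joltage_puzzle_alt
  exact foldl_bank_congr k banks 0
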